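-- pv_equiv track=rewrite | github.com/michaelgermini/MML-DNF-et-Transmission-Morse-Moderne | src/dnf_mml_morse/streaming.py | _find_safe_cutoff
-- ===== SOURCE A (Python) =====
-- def _find_safe_cutoff(text: str, max_length: int) -> int:
--     """
--     Trouve un point de coupure sûr dans le texte
--
--     Args:
--         text: Texte à couper
--         max_length: Longueur maximale
--
--     Returns:
--         Position de coupure
--     """
--     if len(text) <= max_length:
--         return len(text)
--
--     # Chercher la dernière fin de balise avant max_length
--     cutoff = max_length
--
--     # Chercher en arrière pour trouver une fin de balise
--     for i in range(min(max_length, len(text) - 1), 0, -1):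
--         if text[i] == '>' and (i == 0 or text[i-1] != '\\'):  # > non échappé
--             cutoff = i + 1
--             break
--         elif text[i] in '\n\r':  # Fin de ligne
--             cutoff = i
--             break
--
--     return cutoff
-- ===== SOURCE B (Python) =====
-- def _find_safe_cutoff(text: str, max_length: int) -> int:
--     """Find a safe cutoff point: two independent forward searches (last
--     unescaped '>' and last newline) instead of one fused backward break-loop."""
--     n = len(text)
--     if n <= max_length:
--         return n
--     # Here max_length < n, so the valid index range is [1, max_length].
--     gt = max((i for i in range(1, max_length + 1)
--               if text[i] == '>' and text[i - 1] != '\\'), default=-1)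
--     nl = max((i for i in range(1, max_length + 1)
--               if text[i] in '\n\r'), default=-1)
--     if gt == -1 and nl == -1:
--         return max_length
--     return gt + 1 if gt > nl else nl
-- ===== Notes on version B (the rewrite author's own statement) =====
-- stated objective: alternative
-- what changed: Replaced the single fused backward break-loop with two independent forward maximum searches over the valid index range (last unescaped '>' and last newline), combined afterwards: the larger index wins, '>' yields pos+1, newline yields pos, neither yields max_length.
import Mathlib
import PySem

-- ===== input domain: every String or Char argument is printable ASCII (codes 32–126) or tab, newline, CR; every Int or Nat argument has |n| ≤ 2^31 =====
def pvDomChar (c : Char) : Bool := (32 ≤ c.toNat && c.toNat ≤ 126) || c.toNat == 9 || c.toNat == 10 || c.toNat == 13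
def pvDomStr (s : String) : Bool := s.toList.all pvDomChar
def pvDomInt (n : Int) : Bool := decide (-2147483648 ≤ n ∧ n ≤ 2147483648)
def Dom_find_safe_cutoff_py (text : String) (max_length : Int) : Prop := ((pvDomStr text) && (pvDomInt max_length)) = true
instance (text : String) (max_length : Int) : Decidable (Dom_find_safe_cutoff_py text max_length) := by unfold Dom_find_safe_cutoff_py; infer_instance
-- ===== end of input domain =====

-- B replaces A's fused backward break-loop by two independent forward max-searches
-- (last unescaped '>' and last newline) combined afterwards; objective: alternative decomposition.

-- ===== PORT A =====
-- backward loop 'for i in range(min(max_length, len(text)-1), 0, -1)': i counts down from the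
-- start value to 1; indices are always in range there, so text[i] is PySem.List.pyGetD.
def pvLoopA (cs : List Char) : Nat → Int → Int
  | 0, cutoff => cutoff
  | Nat.succ k, cutoff =>
    let i : Int := ((k + 1 : Nat) : Int)
    if PySem.List.pyGetD cs i ' ' = '>' ∧ (i = 0 ∨ PySem.List.pyGetD cs (i - 1) ' ' ≠ '\\') then
      i + 1
    else if PySem.List.pyGetD cs i ' ' = '\n' ∨ PySem.List.pyGetD cs i ' ' = '\r' then
      i
    else
      pvLoopA cs k cutoff

def find_safe_cutoff_py (text : String) (max_length : Int) : Int :=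
  let cs := text.toList
  if (cs.length : Int) ≤ max_length then (cs.length : Int)
  else pvLoopA cs (min max_length ((cs.length : Int) - 1)).toNat max_length

-- ===== PORT B =====
-- 'max((i for i in idxs if c(i)), default=-1)' as a left fold keeping the running maximum.
def pvFoldMax (c : Int → Bool) (idxs : List Int) (a : Int) : Int :=
  idxs.foldl (fun a i => if c i then max a i else a) a

def pvGtCond (cs : List Char) (i : Int) : Bool :=
  decide (PySem.List.pyGetD cs i ' ' = '>' ∧ PySem.List.pyGetD cs (i - 1) ' ' ≠ '\\')

def pvNlCond (cs : List Char) (i : Int) : Bool :=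
  decide (PySem.List.pyGetD cs i ' ' = '\n' ∨ PySem.List.pyGetD cs i ' ' = '\r')

def find_safe_cutoff_py_alt (text : String) (max_length : Int) : Int :=
  let cs := text.toList
  if (cs.length : Int) ≤ max_length then (cs.length : Int)
  else
    let gt := pvFoldMax (pvGtCond cs) (PySem.List.pyRange 1 (max_length + 1) 1) (-1)
    let nl := pvFoldMax (pvNlCond cs) (PySem.List.pyRange 1 (max_length + 1) 1) (-1)
    if gt = -1 ∧ nl = -1 then max_length
    else if gt > nl then gt + 1 else nl

-- ===== PRECONDITION & SPEC =====
def Spec_find_safe_cutoff_py (text : String) (max_length : Int) (out : Int) : Prop := out = find_safe_cutoff_py_alt text max_length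
instance (text : String) (max_length : Int) (out : Int) : Decidable (Spec_find_safe_cutoff_py text max_length out) := by unfold Spec_find_safe_cutoff_py; infer_instance

-- ===== CLAIM (what is proved, stated in full; the proofs are below) =====
def Claim_equal_find_safe_cutoff_py : Prop := ∀ (text : String) (max_length : Int), Dom_find_safe_cutoff_py text max_length → Spec_find_safe_cutoff_py text max_length (find_safe_cutoff_py text max_length)

-- ===== LEMMAS AND PROOFS =====

lemma pvFoldMax_le (c : Int → Bool) (l : List Int) (k : Int) :
    ∀ a, a ≤ k → (∀ i ∈ l, i ≤ k) → pvFoldMax c l a ≤ k := by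
  induction l with
  | nil => intro a ha _; simpa [pvFoldMax] using ha
  | cons x xs ih =>
    intro a ha hmem
    simp only [pvFoldMax, List.foldl_cons]
    by_cases hc : c x
    · rw [if_pos hc]
      exact ih _ (max_le ha (hmem x (by simp))) (fun i hi => hmem i (by simp [hi]))
    · rw [if_neg hc]
      exact ih _ ha (fun i hi => hmem i (by simp [hi]))

lemma pvFoldMax_append_singleton (c : Int → Bool) (l : List Int) (x a : Int) :
    pvFoldMax c (l ++ [x]) a = if c x then max (pvFoldMax c l a) x else pvFoldMax c l a := by
  simp [pvFoldMax, List.foldl_append]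

lemma pvRange_le (m : Nat) : ∀ i ∈ PySem.List.pyRange 1 ((m : Int) + 1) 1, i ≤ (m : Int) := by
  intro i hi
  have := (PySem.List.mem_pyRange_one).1 hi
  omega

-- The heart of the equivalence: the backward break-loop over indices m..1 equals
-- the combination of the two forward maximum searches over 1..m.
lemma pvMain (cs : List Char) (d : Int) (m : Nat) :
    pvLoopA cs m d =
      (if pvFoldMax (pvGtCond cs) (PySem.List.pyRange 1 ((m : Int) + 1) 1) (-1) = -1 ∧
          pvFoldMax (pvNlCond cs) (PySem.List.pyRange 1 ((m : Int) + 1) 1) (-1) = -1 then d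
       else if pvFoldMax (pvGtCond cs) (PySem.List.pyRange 1 ((m : Int) + 1) 1) (-1) >
              pvFoldMax (pvNlCond cs) (PySem.List.pyRange 1 ((m : Int) + 1) 1) (-1) then
         pvFoldMax (pvGtCond cs) (PySem.List.pyRange 1 ((m : Int) + 1) 1) (-1) + 1
       else pvFoldMax (pvNlCond cs) (PySem.List.pyRange 1 ((m : Int) + 1) 1) (-1)) := by
  induction m with
  | zero =>
    rw [PySem.List.pyRange_one_eq_nil (by norm_num)]
    simp [pvLoopA, pvFoldMax]
  | succ m ih =>
    have hsplit : PySem.List.pyRange 1 (((m + 1 : Nat) : Int) + 1) 1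
        = PySem.List.pyRange 1 ((m : Int) + 1) 1 ++ [(m : Int) + 1] := by
      push_cast
      exact PySem.List.pyRange_one_succ_right (by omega)
    have hG := pvFoldMax_le (pvGtCond cs) (PySem.List.pyRange 1 ((m : Int) + 1) 1) (m : Int)
      (-1) (by omega) (pvRange_le m)
    have hN := pvFoldMax_le (pvNlCond cs) (PySem.List.pyRange 1 ((m : Int) + 1) 1) (m : Int)
      (-1) (by omega) (pvRange_le m)
    set G := pvFoldMax (pvGtCond cs) (PySem.List.pyRange 1 ((m : Int) + 1) 1) (-1) with hGdef
    set N := pvFoldMax (pvNlCond cs) (PySem.List.pyRange 1 ((m : Int) + 1) 1) (-1) with hNdef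
    have hi : (((m + 1 : Nat) : Int)) = (m : Int) + 1 := by push_cast; ring
    rw [hsplit, pvFoldMax_append_singleton, pvFoldMax_append_singleton, ← hGdef, ← hNdef]
    by_cases hg : PySem.List.pyGetD cs ((m : Int) + 1) ' ' = '>' ∧
        PySem.List.pyGetD cs ((m : Int) + 1 - 1) ' ' ≠ '\\'
    · -- unescaped '>' at index m+1: the loop breaks with i+1; gt wins on B's side
      have hgc : pvGtCond cs ((m : Int) + 1) = true := by
        simp only [pvGtCond, decide_eq_true_eq]; exact hg
      have hnc : pvNlCond cs ((m : Int) + 1) = false := by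
        simp only [pvNlCond, decide_eq_false_iff_not]
        intro h
        rcases h with h | h <;> rw [hg.1] at h <;> exact absurd h (by decide)
      have hloop : pvLoopA cs (m + 1) d = (m : Int) + 1 + 1 := by
        simp only [pvLoopA, hi]
        rw [if_pos ⟨hg.1, Or.inr hg.2⟩]
      rw [hloop, hgc, hnc]
      have hmax : max G ((m : Int) + 1) = (m : Int) + 1 := max_eq_right (by omega)
      simp only [if_true, if_false, Bool.false_eq_true, hmax]
      split_ifs <;> omega
    · by_cases hn : PySem.List.pyGetD cs ((m : Int) + 1) ' ' = '\n' ∨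
          PySem.List.pyGetD cs ((m : Int) + 1) ' ' = '\r'
      · -- newline at index m+1: the loop breaks with i; nl wins on B's side
        have hgc : pvGtCond cs ((m : Int) + 1) = false := by
          simp only [pvGtCond, decide_eq_false_iff_not]
          intro h
          rcases hn with h2 | h2 <;> rw [h2] at h <;> exact absurd h.1 (by decide)
        have hnc : pvNlCond cs ((m : Int) + 1) = true := by
          simp only [pvNlCond, decide_eq_true_eq]; exact hn
        have hgfalse : ¬ (PySem.List.pyGetD cs ((m : Int) + 1) ' ' = '>' ∧
            (((m : Int) + 1) = 0 ∨ PySem.List.pyGetD cs ((m : Int) + 1 - 1) ' ' ≠ '\\')) := by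
          intro h
          rcases hn with h2 | h2 <;> rw [h2] at h <;> exact absurd h.1 (by decide)
        have hloop : pvLoopA cs (m + 1) d = (m : Int) + 1 := by
          simp only [pvLoopA, hi]
          rw [if_neg hgfalse, if_pos hn]
        rw [hloop, hgc, hnc]
        have hmax : max N ((m : Int) + 1) = (m : Int) + 1 := max_eq_right (by omega)
        simp only [if_true, if_false, Bool.false_eq_true, hmax]
        split_ifs <;> omega
      · -- neither: the loop continues; B's folds keep their values — use the IH
        have hgc : pvGtCond cs ((m : Int) + 1) = false := by
          simp only [pvGtCond, decide_eq_false_iff_not]; exact hg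
        have hnc : pvNlCond cs ((m : Int) + 1) = false := by
          simp only [pvNlCond, decide_eq_false_iff_not]; exact hn
        have hgfalse : ¬ (PySem.List.pyGetD cs ((m : Int) + 1) ' ' = '>' ∧
            (((m : Int) + 1) = 0 ∨ PySem.List.pyGetD cs ((m : Int) + 1 - 1) ' ' ≠ '\\')) := by
          intro h
          rcases h.2 with h2 | h2
          · omega
          · exact hg ⟨h.1, h2⟩
        have hloop : pvLoopA cs (m + 1) d = pvLoopA cs m d := by
          simp only [pvLoopA, hi]
          rw [if_neg hgfalse, if_neg hn]
        rw [hloop, hgc, hnc]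
        simp only [if_false, Bool.false_eq_true]
        exact ih

-- ===== VERDICT (by name: the statement is the Claim_ definition above) =====
theorem find_safe_cutoff_py_spec : Claim_equal_find_safe_cutoff_py := by
  intro text max_length _
  unfold Spec_find_safe_cutoff_py find_safe_cutoff_py find_safe_cutoff_py_alt
  by_cases hlen : ((text.toList.length : Int)) ≤ max_length
  · rw [if_pos hlen, if_pos hlen]
  · rw [if_neg hlen, if_neg hlen]
    by_cases hm : 0 ≤ max_length
    · have hmin : min max_length ((text.toList.length : Int) - 1) = max_length := by omega
      have hnat : ((max_length.toNat : Int)) = max_length := Int.toNat_of_nonneg hm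
      rw [hmin]
      have := pvMain text.toList max_length max_length.toNat
      rw [hnat] at this
      exact this
    · -- max_length < 0: the loop range and B's index range 1..max_length are both empty
      have hmin : (min max_length ((text.toList.length : Int) - 1)).toNat = 0 := by omega
      rw [hmin, PySem.List.pyRange_one_eq_nil (by omega)]
      simp [pvLoopA, pvFoldMax]
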